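-- pv_equiv track=rewrite | github.com/yaranasserr/aws | OA leetcodediscuss/hub.py | precompute_next_hub
-- ===== SOURCE A (Python) =====
-- def precompute_next_hub(sorted_hubs, n):
--     next_hub = [-1] * n
--     # Fill the next_hub array in reverse order
--     last_hub = sorted_hubs[-1]
--     for i in range(n - 2, -1, -1):
--         if i in sorted_hubs:
--             last_hub = i
--         next_hub[i] = last_hub
--     return next_hub
-- ===== SOURCE B (Python) =====
-- def precompute_next_hub(sorted_hubs, n):
--     last = sorted_hubs[-1]
--     next_hub = [-1] * n
--     hubs = sorted(set(h for h in sorted_hubs if 0 <= h <= n - 2))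
--     start = 0
--     for h in hubs:
--         for i in range(start, h + 1):
--             next_hub[i] = h
--         start = h + 1
--     for i in range(start, n - 1):
--         next_hub[i] = last
--     return next_hub
-- ===== Notes on version B (the rewrite author's own statement) =====
-- stated objective: faster
-- what changed: A rescans sorted_hubs with a membership test at every position of a reverse loop; B builds the sorted deduplicated list of in-range hubs once and fills each result segment [start, h] left to right, then fills the tail with the last hub.
import Mathlib
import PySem

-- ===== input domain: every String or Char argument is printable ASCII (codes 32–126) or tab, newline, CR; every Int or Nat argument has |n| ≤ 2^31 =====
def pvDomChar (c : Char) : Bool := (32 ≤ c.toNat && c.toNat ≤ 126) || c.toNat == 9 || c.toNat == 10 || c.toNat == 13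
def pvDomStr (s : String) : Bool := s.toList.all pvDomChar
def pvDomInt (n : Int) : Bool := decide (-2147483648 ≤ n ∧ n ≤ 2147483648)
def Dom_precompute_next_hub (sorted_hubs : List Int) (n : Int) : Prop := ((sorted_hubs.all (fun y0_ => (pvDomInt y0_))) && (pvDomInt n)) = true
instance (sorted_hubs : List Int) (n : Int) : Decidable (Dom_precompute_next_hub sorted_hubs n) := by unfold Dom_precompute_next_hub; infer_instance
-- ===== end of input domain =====

-- B replaces A's per-position membership scan over sorted_hubs with one sorted+deduplicated
-- hub list whose segments are filled left to right (objective: faster, O((n+m log m)) vs O(n*m)).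

-- ===== PORT A =====
-- literal transliteration of A: [-1]*n is List.replicate n.toNat (Python's list*negative = []),
-- sorted_hubs[-1] is pyGet? (none = IndexError, excluded by Pre_), the reverse loop is a foldl
-- over range(n-2,-1,-1) carrying (next_hub, last_hub).
def precompute_next_hub (sorted_hubs : List Int) (n : Int) : List Int :=
  match PySem.List.pyGet? sorted_hubs (-1) with
  | none => []  -- IndexError: unreachable under Pre_
  | some last_hub =>
    let st := (PySem.List.pyRange (n - 2) (-1) (-1)).foldl
      (fun (st : List Int × Int) i =>
        let lh := if i ∈ sorted_hubs then i else st.2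
        (PySem.List.pySetD st.1 i lh, lh))
      (List.replicate n.toNat (-1), last_hub)
    st.1

-- ===== PORT B =====
-- literal transliteration of Source B: sorted(set(filtered)) once, then fill each segment
-- [start, h] with h, finally fill [start, n-1) with last.
def precompute_next_hub_alt (sorted_hubs : List Int) (n : Int) : List Int :=
  match PySem.List.pyGet? sorted_hubs (-1) with
  | none => []  -- IndexError: unreachable under Pre_
  | some last =>
    let next_hub := List.replicate n.toNat (-1 : Int)
    let hubs := PySem.List.sorted
      (PySem.Set.ofList (sorted_hubs.filter (fun h => decide (0 ≤ h) && decide (h ≤ n - 2))))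
      (fun x => x) false
    let st := hubs.foldl
      (fun (st : List Int × Int) h =>
        ((PySem.List.pyRange st.2 (h + 1) 1).foldl (fun l i => PySem.List.pySetD l i h) st.1,
         h + 1))
      (next_hub, 0)
    (PySem.List.pyRange st.2 (n - 1) 1).foldl (fun l i => PySem.List.pySetD l i last) st.1

-- ===== PRECONDITION & SPEC =====
-- Pre_ excludes only the empty hub list, on which both A and B raise IndexError at sorted_hubs[-1].
def Pre_precompute_next_hub (sorted_hubs : List Int) (n : Int) : Prop := sorted_hubs ≠ []
instance (sorted_hubs : List Int) (n : Int) : Decidable (Pre_precompute_next_hub sorted_hubs n) := by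
  unfold Pre_precompute_next_hub; infer_instance
def pvWitness_precompute_next_hub : List Int × Int := ([1, 3], 6)

def Spec_precompute_next_hub (sorted_hubs : List Int) (n : Int) (out : List Int) : Prop := out = precompute_next_hub_alt sorted_hubs n
instance (sorted_hubs : List Int) (n : Int) (out : List Int) : Decidable (Spec_precompute_next_hub sorted_hubs n out) := by unfold Spec_precompute_next_hub; infer_instance

-- ===== CLAIM (what is proved, stated in full; the proofs are below) =====
def Claim_equal_precompute_next_hub : Prop := ∀ (sorted_hubs : List Int) (n : Int), Dom_precompute_next_hub sorted_hubs n → Pre_precompute_next_hub sorted_hubs n → Spec_precompute_next_hub sorted_hubs n (precompute_next_hub sorted_hubs n)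

-- ===== LEMMAS AND PROOFS =====
-- proof helpers: pvNxt (smallest hub ≥ j, else default), pvEnd (first index past the filled
-- segments), pvScan (A's linear membership scan as a fuel recursion), pvAStep/pvBStep (the
-- two loop bodies, named for the invariant lemmas).

-- spec value: smallest hub >= j, else default
def pvNxt (hubs : List Int) (d j : Int) : Int :=
  match hubs.find? (fun h => decide (j ≤ h)) with
  | some h => h
  | none => d

def pvEnd (L : List Int) (s : Int) : Int :=
  match L.getLast? with
  | some h => h + 1
  | none => s

def pvScan (S : List Int) (lh : Int) : Nat → Int → Int
  | 0, _ => lh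
  | k+1, j => if j ∈ S then j else pvScan S lh k (j+1)

lemma fill_len (a b v : Int) (l : List Int) :
    ((PySem.List.pyRange a b 1).foldl (fun l i => PySem.List.pySetD l i v) l).length = l.length := by
  induction hk : (b - a).toNat generalizing a l with
  | zero =>
    rw [PySem.List.pyRange_one_eq_nil (by omega)]
    rfl
  | succ k ih =>
    rw [PySem.List.pyRange_one_cons (by omega)]
    simp only [List.foldl_cons]
    rw [ih (a+1) _ (by omega)]
    exact PySem.List.length_pySetD _ _ _

lemma fill_get (a b v : Int) (ha : 0 ≤ a) (l : List Int) (j : Nat) :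
    ((PySem.List.pyRange a b 1).foldl (fun l i => PySem.List.pySetD l i v) l)[j]? =
      if a ≤ (j:Int) ∧ (j:Int) < b ∧ j < l.length then some v else l[j]? := by
  induction hk : (b - a).toNat generalizing a l with
  | zero =>
    rw [PySem.List.pyRange_one_eq_nil (by omega)]
    simp only [List.foldl_nil]
    rw [if_neg (by omega)]
  | succ k ih =>
    rw [PySem.List.pyRange_one_cons (by omega)]
    simp only [List.foldl_cons]
    rw [ih (a+1) (by omega) _ (by omega), PySem.List.pySetD_of_nonneg l v ha]
    rw [List.length_set, List.getElem?_set]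
    have hab : a < b := by omega
    split_ifs <;>
      first
        | rfl
        | omega
        | (exact List.getElem?_eq_none (by omega))
        | (exact (List.getElem?_eq_none (by omega)).symm)

lemma find?_sorted_self (L : List Int) (j : Int) (hst : L.Pairwise (· < ·)) (hj : j ∈ L) :
    L.find? (fun h => decide (j ≤ h)) = some j := by
  induction L with
  | nil => cases hj
  | cons h R ih =>
    rcases List.mem_cons.mp hj with rfl | hjR
    · exact List.find?_cons_of_pos (by simp)
    · have hlt : h < j := (List.pairwise_cons.mp hst).1 j hjR
      rw [List.find?_cons_of_neg (by simp; omega)]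
      exact ih (List.pairwise_cons.mp hst).2 hjR

lemma find?_shift (L : List Int) (j : Int) (hj : j ∉ L) :
    L.find? (fun h => decide (j ≤ h)) = L.find? (fun h => decide (j + 1 ≤ h)) := by
  induction L with
  | nil => rfl
  | cons h R ih =>
    have hne : h ≠ j := fun e => hj (e ▸ List.mem_cons_self ..)
    by_cases hle : j + 1 ≤ h
    · rw [List.find?_cons_of_pos (by simp; omega), List.find?_cons_of_pos (by simpa using hle)]
    · rw [List.find?_cons_of_neg (by simp; omega), List.find?_cons_of_neg (by simpa using hle)]
      exact ih (fun hm => hj (List.mem_cons_of_mem _ hm))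

lemma pvEnd_ge (L : List Int) (s : Int) (hlo : ∀ h ∈ L, s ≤ h) : s ≤ pvEnd L s := by
  cases hL : L.getLast? with
  | none => simp [pvEnd, hL]
  | some h =>
    have := hlo h (List.mem_of_getLast? hL)
    simp only [pvEnd, hL]; omega

lemma lt_pvEnd (L : List Int) (s : Int) (hst : L.Pairwise (· < ·)) :
    ∀ h ∈ L, h < pvEnd L s := by
  rcases List.eq_nil_or_concat' L with rfl | ⟨I, x, rfl⟩
  · intro h hm; cases hm
  · intro h hm
    have hend : pvEnd (I ++ [x]) s = x + 1 := by
      simp [pvEnd]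
    rw [hend]
    rcases List.mem_append.mp hm with hI | hx
    · have := (List.pairwise_append.mp hst).2.2 h hI x (by simp)
      omega
    · simp at hx; omega

def pvBStep : (List Int × Int) → Int → (List Int × Int) := fun st h =>
  ((PySem.List.pyRange st.2 (h + 1) 1).foldl (fun l i => PySem.List.pySetD l i h) st.1, h + 1)

def pvAStep (S : List Int) : (List Int × Int) → Int → (List Int × Int) := fun st i =>
  let lh := if i ∈ S then i else st.2
  (PySem.List.pySetD st.1 i lh, lh)

lemma pvEnd_nil (s : Int) : pvEnd [] s = s := rfl

lemma pvEnd_cons (h : Int) (R : List Int) (s : Int) : pvEnd (h :: R) s = pvEnd R (h + 1) := by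
  cases R with
  | nil => rfl
  | cons b T =>
    cases hx : (b :: T).getLast? with
    | none => simp at hx
    | some x => simp [pvEnd, List.getLast?_cons_cons, hx]

lemma pvNxt_cons_le (h : Int) (R : List Int) (d j : Int) (hj : j ≤ h) :
    pvNxt (h :: R) d j = h := by
  have : List.find? (fun x => decide (j ≤ x)) (h :: R) = some h :=
    List.find?_cons_of_pos (by simpa using hj)
  simp only [pvNxt, this]

lemma pvNxt_cons_gt (h : Int) (R : List Int) (d j : Int) (hj : h < j) :
    pvNxt (h :: R) d j = pvNxt R d j := by
  have : List.find? (fun x => decide (j ≤ x)) (h :: R) = List.find? (fun x => decide (j ≤ x)) R :=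
    List.find?_cons_of_neg (by simp; omega)
  simp only [pvNxt, this]

lemma hubfold (L : List Int) (hst : L.Pairwise (· < ·)) :
    ∀ (s : Int) (l : List Int), 0 ≤ s → (∀ h ∈ L, s ≤ h) → (∀ h ∈ L, h < (l.length : Int)) →
    (L.foldl pvBStep (l, s)).2 = pvEnd L s ∧
    (L.foldl pvBStep (l, s)).1.length = l.length ∧
    ∀ (d : Int) (j : Nat), (L.foldl pvBStep (l, s)).1[j]? =
      if s ≤ (j:Int) ∧ (j:Int) < pvEnd L s then some (pvNxt L d j) else l[j]? := by
  induction L with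
  | nil =>
    intro s l _ _ _
    refine ⟨rfl, rfl, fun d j => ?_⟩
    rw [pvEnd_nil, List.foldl_nil, if_neg (by omega)]
  | cons h R ih =>
    intro s l hs hlo hhi
    have hsh : s ≤ h := hlo h (by simp)
    have hhl : h < (l.length : Int) := hhi h (by simp)
    have hpw := List.pairwise_cons.mp hst
    have hR := hpw.2
    simp only [List.foldl_cons]
    have hstep : pvBStep (l, s) h =
        ((PySem.List.pyRange s (h + 1) 1).foldl (fun l i => PySem.List.pySetD l i h) l, h + 1) := rfl
    rw [hstep]
    set l' := (PySem.List.pyRange s (h + 1) 1).foldl (fun l i => PySem.List.pySetD l i h) l with hl'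
    have hlen' : l'.length = l.length := fill_len _ _ _ _
    have hihyp := ih hR (h + 1) l' (by omega)
      (fun x hx => by have := hpw.1 x hx; omega)
      (fun x hx => by rw [hlen']; exact hhi x (List.mem_cons_of_mem _ hx))
    have he : pvEnd (h :: R) s = pvEnd R (h + 1) := pvEnd_cons h R s
    have hege : h + 1 ≤ pvEnd R (h + 1) :=
      pvEnd_ge R (h + 1) (fun x hx => by have := hpw.1 x hx; omega)
    refine ⟨by rw [hihyp.1, he], by rw [hihyp.2.1, hlen'], fun d j => ?_⟩
    rw [hihyp.2.2 d j, he]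
    have hfill := fill_get s (h + 1) h hs l j
    rw [← hl'] at hfill
    by_cases hj1 : (j:Int) < s
    · rw [if_neg (by omega), if_neg (by omega), hfill, if_neg (by omega)]
    · by_cases hj2 : (j:Int) ≤ h
      · rw [if_neg (by omega), hfill,
          if_pos (show s ≤ (j:Int) ∧ (j:Int) < h + 1 ∧ j < l.length by omega),
          if_pos (show s ≤ (j:Int) ∧ (j:Int) < pvEnd R (h + 1) by omega),
          pvNxt_cons_le h R d j (by omega)]
      · rw [pvNxt_cons_gt h R d j (by omega)]
        by_cases hj3 : (j:Int) < pvEnd R (h + 1)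
        · rw [if_pos ⟨by omega, hj3⟩, if_pos ⟨by omega, hj3⟩]
        · rw [if_neg (by omega), if_neg (by omega), hfill, if_neg (by omega)]

lemma scan_absorb (S : List Int) (lh a : Int) :
    ∀ (k : Nat) (j : Int), j + k = a →
      pvScan S lh (k + 1) j = pvScan S (if a ∈ S then a else lh) k j := by
  intro k
  induction k with
  | zero =>
    intro j hj
    have : j = a := by omega
    subst this
    simp [pvScan]
  | succ k ih =>
    intro j hj
    show (if j ∈ S then j else pvScan S lh (k + 1) (j + 1)) =
      (if j ∈ S then j else pvScan S (if a ∈ S then a else lh) k (j + 1))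
    rw [ih (j + 1) (by omega)]

lemma Afold (S : List Int) :
    ∀ (fuel : Nat) (a : Int) (l : List Int) (lh : Int), (a + 1).toNat = fuel → a < (l.length : Int) →
    ((PySem.List.pyRange a (-1) (-1)).foldl (pvAStep S) (l, lh)).1.length = l.length ∧
    ∀ j : Nat, ((PySem.List.pyRange a (-1) (-1)).foldl (pvAStep S) (l, lh)).1[j]? =
      if (j:Int) ≤ a then some (pvScan S lh (a + 1 - j).toNat j) else l[j]? := by
  intro fuel
  induction fuel with
  | zero =>
    intro a l lh hf ha
    rw [PySem.List.pyRange_neg_one_eq_nil (by omega), List.foldl_nil]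
    exact ⟨rfl, fun j => by rw [if_neg (by omega)]⟩
  | succ fuel ih =>
    intro a l lh hf ha
    have ha0 : 0 ≤ a := by omega
    rw [PySem.List.pyRange_neg_one_cons (by omega), List.foldl_cons]
    have hstep : pvAStep S (l, lh) a =
        (PySem.List.pySetD l a (if a ∈ S then a else lh), if a ∈ S then a else lh) := rfl
    rw [hstep]
    set lh' := if a ∈ S then a else lh with hlh'
    set l' := PySem.List.pySetD l a lh' with hl'
    have hlen' : l'.length = l.length := PySem.List.length_pySetD _ _ _
    have hihyp := ih (a - 1) l' lh' (by omega) (by omega)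
    refine ⟨by rw [hihyp.1, hlen'], fun j => ?_⟩
    rw [hihyp.2 j]
    have hset : l'[j]? = if a.toNat = j then (if a.toNat < l.length then some lh' else none) else l[j]? := by
      rw [hl', PySem.List.pySetD_of_nonneg l lh' ha0, List.getElem?_set]
    by_cases hj1 : (j:Int) ≤ a - 1
    · rw [if_pos hj1, if_pos (by omega)]
      have e1 : (a - 1 + 1 - (j:Int)).toNat = (a - (j:Int)).toNat := by omega
      have e2 : (a + 1 - (j:Int)).toNat = (a - (j:Int)).toNat + 1 := by omega
      rw [e1, e2, scan_absorb S lh a (a - (j:Int)).toNat j (by omega), hlh']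
    · by_cases hj2 : (j:Int) = a
      · rw [if_neg (by omega), hset, if_pos (by omega), if_pos (by omega), if_pos (by omega)]
        have h1 : (a + 1 - (j:Int)).toNat = 1 := by omega
        rw [h1]
        have h2 : pvScan S lh 1 (j:Int) = lh' := by
          show (if (j:Int) ∈ S then (j:Int) else lh) = lh'
          rw [hlh', hj2]
        rw [h2]
      · rw [if_neg (by omega), if_neg (by omega), hset, if_neg (by omega)]

lemma bridge (S hubs : List Int) (m last : Int) (hst : hubs.Pairwise (· < ·))
    (hmem : ∀ h : Int, h ∈ hubs ↔ h ∈ S ∧ 0 ≤ h ∧ h ≤ m) :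
    ∀ (k : Nat) (j : Int), 0 ≤ j → j + k = m + 1 → pvScan S last k j = pvNxt hubs last j := by
  intro k
  induction k with
  | zero =>
    intro j hj0 hjk
    have hnone : hubs.find? (fun h => decide (j ≤ h)) = none :=
      List.find?_eq_none.mpr (fun h hm => by
        have := (hmem h).mp hm
        simp; omega)
    simp only [pvScan, pvNxt, hnone]
  | succ k ih =>
    intro j hj0 hjk
    show (if j ∈ S then j else pvScan S last k (j + 1)) = pvNxt hubs last j
    by_cases hjS : j ∈ S
    · rw [if_pos hjS]
      have hjh : j ∈ hubs := (hmem j).mpr ⟨hjS, hj0, by omega⟩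
      simp only [pvNxt, find?_sorted_self hubs j hst hjh]
    · rw [if_neg hjS]
      have hnm : j ∉ hubs := fun hm => hjS ((hmem j).mp hm).1
      have : pvNxt hubs last j = pvNxt hubs last (j + 1) := by
        simp only [pvNxt, find?_shift hubs j hnm]
      rw [this, ih (j + 1) (by omega) (by omega)]

lemma pvEnd_cases (L : List Int) (s : Int) : pvEnd L s = s ∨ ∃ h ∈ L, pvEnd L s = h + 1 := by
  cases hL : L.getLast? with
  | none => left; simp [pvEnd, hL]
  | some h => right; exact ⟨h, List.mem_of_getLast? hL, by simp [pvEnd, hL]⟩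


lemma main_eq (S : List Int) (n : Int) (hpre : S ≠ []) :
    precompute_next_hub S n = precompute_next_hub_alt S n := by
  cases hget : PySem.List.pyGet? S (-1) with
  | none =>
    exfalso
    rw [PySem.List.pyGet?_neg_one] at hget
    exact hpre (List.getLast?_eq_none_iff.mp hget)
  | some last =>
    unfold precompute_next_hub precompute_next_hub_alt
    rw [hget]
    simp only
    set N := n.toNat with hN
    set l0 : List Int := List.replicate N (-1) with hl0
    have hl0len : l0.length = N := List.length_replicate
    set hubs : List Int := PySem.List.sorted
      (PySem.Set.ofList (S.filter (fun h => decide (0 ≤ h) && decide (h ≤ n - 2))))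
      (fun x => x) false with hhubs
    have hst : hubs.Pairwise (· < ·) := by
      rw [hhubs]; exact PySem.List.sorted_ofList_pairwise_lt _
    have hmem : ∀ h : Int, h ∈ hubs ↔ h ∈ S ∧ 0 ≤ h ∧ h ≤ n - 2 := by
      intro h
      rw [hhubs, PySem.List.mem_sorted, PySem.Set.mem_ofList, List.mem_filter]
      simp
    -- A side
    have hA := Afold S (n - 2 + 1).toNat (n - 2) l0 last rfl (by rw [hl0len]; omega)
    show (List.foldl (pvAStep S) (l0, last) (PySem.List.pyRange (n - 2) (-1) (-1))).1 =
      List.foldl (fun l i => PySem.List.pySetD l i last)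
        (List.foldl pvBStep (l0, 0) hubs).1
        (PySem.List.pyRange (List.foldl pvBStep (l0, 0) hubs).2 (n - 1) 1)
    -- B side
    have hB := hubfold hubs hst 0 l0 le_rfl
      (fun h hm => ((hmem h).mp hm).2.1)
      (fun h hm => by
        have := (hmem h).mp hm
        rw [hl0len]; omega)
    set r2 : Int := pvEnd hubs 0 with hr2
    have hr2ge : 0 ≤ r2 := pvEnd_ge hubs 0 (fun h hm => ((hmem h).mp hm).2.1)
    have hhub_lt : ∀ h ∈ hubs, h < r2 := lt_pvEnd hubs 0 hst
    have hr2cases := pvEnd_cases hubs 0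
    apply List.ext_getElem?
    intro j
    -- rewrite A side
    rw [hA.2 j]
    -- rewrite B side: the outer fold's second component is r2
    rw [hB.1]
    rw [fill_get r2 (n - 1) last hr2ge _ j, hB.2.2 last j, hB.2.1, hl0len]
    by_cases hj1 : (j : Int) ≤ n - 2
    · have hn2 : 2 ≤ n := by omega
      have hjN : j < N := by omega
      have e1 : (n - 2 + 1 - (j:Int)).toNat = (n - 1 - (j:Int)).toNat := by omega
      rw [if_pos hj1, e1,
        bridge S hubs (n - 2) last hst hmem (n - 1 - (j:Int)).toNat j (by omega) (by omega)]
      by_cases hj2 : (j : Int) < r2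
      · rw [if_neg (by omega), if_pos ⟨by omega, hj2⟩]
      · rw [if_pos ⟨by omega, by omega, by omega⟩]
        have hnone : hubs.find? (fun h => decide ((j:Int) ≤ h)) = none :=
          List.find?_eq_none.mpr (fun h hm => by
            have := hhub_lt h hm; simp; omega)
        simp only [pvNxt, hnone]
    · have hjr2 : ¬ ((j:Int) < r2) := by
        rcases hr2cases with h0 | ⟨h, hm, he⟩
        · omega
        · have := ((hmem h).mp hm).2.2; omega
      rw [if_neg hj1, if_neg (by omega), if_neg (by omega)]

-- ===== VERDICT (by name: the statement is the Claim_ definition above) =====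
theorem precompute_next_hub_spec : Claim_equal_precompute_next_hub := by
  intro sorted_hubs n _ hpre
  unfold Spec_precompute_next_hub
  exact main_eq sorted_hubs n hpre
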